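-- pv_equiv track=rewrite | github.com/fsc2016/LeetCode | 9_bsearch_variants.py | bsearch_left_not_less
-- ===== SOURCE A (Python) =====
-- def bsearch_left_not_less(l,value):
--     '''
--     查找第一个大于等于给定值的元素
--     :param l:
--     :param value:
--     :return:
--     '''
--     low = 0
--     high = len(l) - 1
--     while low <= high:
--         mid = low + (high - low) // 2
--         if l[mid] >= value:
--             if mid ==0 or l[mid-1] < value:
--                 return mid
--             else:
--                 high = mid - 1
--         elif l[mid] < value:
--             low = mid + 1
--     return -1
-- ===== SOURCE B (Python) =====
-- def bsearch_left_not_less(l, value):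
--     # Single left-to-right scan: first index whose element is not less than value.
--     for i, x in enumerate(l):
--         if x >= value:
--             return i
--     return -1
-- ===== Notes on version B (the rewrite author's own statement) =====
-- stated objective: simpler
-- what changed: B replaces A's binary search entirely by a single left-to-right linear scan returning the first index with x >= value (trading O(log n) probes for an O(n) scan, which is shorter and obviously correct).
-- outside the precondition, e.g. on bsearch_left_not_less([5, 0, 5], 3): A returns 2, B returns 0; on bsearch_left_not_less([2, 0], 1): A returns 0, B returns 0
import Mathlib
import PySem

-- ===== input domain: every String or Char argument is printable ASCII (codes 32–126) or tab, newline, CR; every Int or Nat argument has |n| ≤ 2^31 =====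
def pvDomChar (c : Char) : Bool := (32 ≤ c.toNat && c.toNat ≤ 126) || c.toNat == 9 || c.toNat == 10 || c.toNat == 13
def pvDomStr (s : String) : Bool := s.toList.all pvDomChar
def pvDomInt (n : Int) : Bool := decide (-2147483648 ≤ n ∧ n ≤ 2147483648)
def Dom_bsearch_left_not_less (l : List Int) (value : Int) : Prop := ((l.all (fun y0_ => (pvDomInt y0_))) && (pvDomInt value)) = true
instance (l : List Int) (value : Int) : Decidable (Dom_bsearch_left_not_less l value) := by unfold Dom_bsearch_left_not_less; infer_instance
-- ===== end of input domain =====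

-- B replaces A's binary search by a single left-to-right linear scan for the first
-- element not less than value: shorter and obviously correct (not faster).

-- ===== PORT A =====
-- A's while loop, with a structural fuel counter (always sufficient: the interval shrinks
-- every iteration); the `none` branches are Python's IndexError, never reached (probes stay in range).
def bsearchALoop (l : List Int) (value : Int) : Nat → Int → Int → Int
  | 0, _, _ => -1
  | fuel + 1, low, high =>
    if low ≤ high then
      let mid := low + PySem.Int.floordiv (high - low) 2
      match PySem.List.pyGet? l mid with
      | none => 0
      | some x =>
        if x ≥ value then
          if mid = 0 then mid
          else
            match PySem.List.pyGet? l (mid - 1) with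
            | none => 0
            | some y => if y < value then mid else bsearchALoop l value fuel low (mid - 1)
        else -- elif l[mid] < value (exhaustive)
          bsearchALoop l value fuel (mid + 1) high
    else -1

def bsearch_left_not_less (l : List Int) (value : Int) : Int :=
  bsearchALoop l value (l.length + 1) 0 ((l.length : Int) - 1)

-- ===== PORT B =====
-- Source B's `for i, x in enumerate(l)` scan, as structural recursion carrying the index i.
def pvScan (value : Int) : List Int → Int → Int
  | [], _ => -1
  | x :: t, i => if x ≥ value then i else pvScan value t (i + 1)

def bsearch_left_not_less_alt (l : List Int) (value : Int) : Int :=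
  pvScan value l 0

-- ===== PRECONDITION & SPEC =====
-- Pre_ excludes unsorted lists whose elements straddle value: binary search assumes a
-- non-decreasingly sorted input, and on such lists the value A returns is an accident of its
-- probe order (equally for B's scan order); no one would specify either. (Unsorted lists
-- entirely below or entirely at/above value are kept: there the order cannot matter.)
def Pre_bsearch_left_not_less (l : List Int) (value : Int) : Prop :=
  l.Pairwise (· ≤ ·) ∨ (∀ x ∈ l, value ≤ x) ∨ (∀ x ∈ l, x < value)
instance (l : List Int) (value : Int) : Decidable (Pre_bsearch_left_not_less l value) := by unfold Pre_bsearch_left_not_less; infer_instance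

def pvWitness_bsearch_left_not_less : List Int × Int := ([1, 2, 2, 5], 2)

def Spec_bsearch_left_not_less (l : List Int) (value : Int) (out : Int) : Prop := out = bsearch_left_not_less_alt l value
instance (l : List Int) (value : Int) (out : Int) : Decidable (Spec_bsearch_left_not_less l value out) := by unfold Spec_bsearch_left_not_less; infer_instance

-- ===== CLAIM (what is proved, stated in full; the proofs are below) =====
def Claim_equal_bsearch_left_not_less : Prop := ∀ (l : List Int) (value : Int), Dom_bsearch_left_not_less l value → Pre_bsearch_left_not_less l value → Spec_bsearch_left_not_less l value (bsearch_left_not_less l value)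

-- ===== LEMMAS AND PROOFS =====

-- midpoint bounds for A's loop
theorem pvMidA_bounds (low high : Int) (h : low ≤ high) :
    low ≤ low + PySem.Int.floordiv (high - low) 2 ∧ low + PySem.Int.floordiv (high - low) 2 ≤ high := by
  rw [PySem.Int.floordiv_eq_ediv_of_pos (by norm_num)]
  have h1 : 0 ≤ (high - low) / 2 := Int.ediv_nonneg (by omega) (by norm_num)
  have h2 : (high - low) / 2 ≤ high - low := Int.ediv_le_self _ (by omega)
  omega

-- On a sorted list, l[i] < value iff i is below the count of elements < value.
theorem pv_lt_iff (value : Int) : ∀ (l : List Int), l.Pairwise (· ≤ ·) →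
    ∀ (i : Nat) (h : i < l.length),
      (l[i] < value ↔ i < l.countP (fun x => decide (x < value))) := by
  intro l
  induction l with
  | nil => intro _ i h; simp at h
  | cons a t ih =>
    intro hp i h
    obtain ⟨ha, ht⟩ := List.pairwise_cons.mp hp
    by_cases hav : a < value
    · cases i with
      | zero => simp [List.countP_cons, hav]
      | succ j =>
        have hj : j < t.length := by simpa using h
        have := ih ht j hj
        simp only [List.getElem_cons_succ, List.countP_cons, hav]
        simpa [Nat.add_lt_add_iff_right] using this
    · have hz : t.countP (fun x => decide (x < value)) = 0 := by
        apply List.countP_eq_zero.mpr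
        intro x hx
        have := ha x hx
        simp only [decide_eq_true_eq]
        omega
      have hk : (a :: t).countP (fun x => decide (x < value)) = 0 := by
        simp [List.countP_cons, hz, hav]
      rw [hk]
      cases i with
      | zero => simp [hav]
      | succ j =>
        have hj : j < t.length := by simpa using h
        have := ha t[j] (List.getElem_mem hj)
        simp only [List.getElem_cons_succ]
        constructor
        · intro hlt; omega
        · intro hlt; omega

theorem pvALoop_eq (l : List Int) (value : Int) (hs : l.Pairwise (· ≤ ·)) :
    ∀ (fuel : Nat) (low high : Int), (high - low + 1).toNat < fuel →
      0 ≤ low → low ≤ (l.countP (fun x => decide (x < value)) : Int) →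
      high ≤ (l.length : Int) - 1 →
      ((l.countP (fun x => decide (x < value)) : Int) ≤ high ∨
        ((l.countP (fun x => decide (x < value)) : Int) = (l.length : Int) ∧ high = (l.length : Int) - 1)) →
      bsearchALoop l value fuel low high =
        (if l.countP (fun x => decide (x < value)) < l.length
          then (l.countP (fun x => decide (x < value)) : Int) else -1) := by
  intro fuel
  induction fuel with
  | zero => intro low high hd; omega
  | succ fuel ih =>
    intro low high hd h0 hlk hh1 hdisj
    rw [bsearchALoop]
    split
    · next hlh =>
      dsimp only
      have hm := pvMidA_bounds low high hlh
      set mid := low + PySem.Int.floordiv (high - low) 2 with hmid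
      have hmn : mid.toNat < l.length := by omega
      have hget : PySem.List.pyGet? l mid = some (l[mid.toNat]'hmn) :=
        PySem.List.pyGet?_eq_some_getElem l (by omega) (by omega)
      rw [hget]
      simp only []
      have hiff := pv_lt_iff value l hs mid.toNat hmn
      split
      · next hge =>
        have hk : (l.countP (fun x => decide (x < value)) : Int) ≤ mid := by
          by_contra hc
          have hlt : mid.toNat < l.countP (fun x => decide (x < value)) := by omega
          have := hiff.mpr hlt
          omega
        split
        · next hm0 =>
          rw [if_pos (by omega)]
          omega
        · next hm0 =>
          have hmn' : (mid - 1).toNat < l.length := by omega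
          have hget' : PySem.List.pyGet? l (mid - 1) = some (l[(mid - 1).toNat]'hmn') :=
            PySem.List.pyGet?_eq_some_getElem l (by omega) (by omega)
          rw [hget']
          simp only []
          have hiff' := pv_lt_iff value l hs (mid - 1).toNat hmn'
          split
          · next hylt =>
            have hkm : (mid - 1).toNat < l.countP (fun x => decide (x < value)) := hiff'.mp hylt
            rw [if_pos (by omega)]
            omega
          · next hylt =>
            have hk' : (l.countP (fun x => decide (x < value)) : Int) ≤ mid - 1 := by
              by_contra hc
              have hlt : (mid - 1).toNat < l.countP (fun x => decide (x < value)) := by omega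
              have := hiff'.mpr hlt
              omega
            exact ih low (mid - 1) (by omega) h0 hlk (by omega) (Or.inl hk')
      · next hge =>
        have hlt : l[mid.toNat] < value := by omega
        have hkm : mid.toNat < l.countP (fun x => decide (x < value)) := hiff.mp hlt
        exact ih (mid + 1) high (by omega) (by omega) (by omega) hh1 hdisj
    · next hlh =>
      rw [if_neg (by rcases hdisj with h | ⟨h1, h2⟩ <;> omega)]

theorem pvALoop_allGe (l : List Int) (value : Int) (hall : ∀ x ∈ l, value ≤ x) :
    ∀ (fuel : Nat) (high : Int), (high + 1).toNat < fuel → 0 ≤ high → high ≤ (l.length : Int) - 1 →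
      bsearchALoop l value fuel 0 high = 0 := by
  intro fuel
  induction fuel with
  | zero => intro high hd; omega
  | succ fuel ih =>
    intro high hd h0 hh1
    rw [bsearchALoop]
    rw [if_pos (by omega : (0:Int) ≤ high)]
    dsimp only
    have hm := pvMidA_bounds 0 high h0
    set mid := 0 + PySem.Int.floordiv (high - 0) 2 with hmid
    have hmn : mid.toNat < l.length := by omega
    have hget : PySem.List.pyGet? l mid = some (l[mid.toNat]'hmn) :=
      PySem.List.pyGet?_eq_some_getElem l (by omega) (by omega)
    rw [hget]
    simp only []
    rw [if_pos (by have := hall _ (List.getElem_mem hmn); omega : l[mid.toNat]'hmn ≥ value)]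
    by_cases hm0 : mid = 0
    · rw [if_pos hm0]; omega
    · rw [if_neg hm0]
      have hmn' : (mid - 1).toNat < l.length := by omega
      have hget' : PySem.List.pyGet? l (mid - 1) = some (l[(mid - 1).toNat]'hmn') :=
        PySem.List.pyGet?_eq_some_getElem l (by omega) (by omega)
      rw [hget']
      simp only []
      rw [if_neg (by have := hall _ (List.getElem_mem hmn'); omega : ¬ (l[(mid - 1).toNat]'hmn' < value))]
      exact ih (mid - 1) (by omega) (by omega) (by omega)

theorem pvALoop_allLt (l : List Int) (value : Int) (hall : ∀ x ∈ l, x < value) :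
    ∀ (fuel : Nat) (low high : Int), (high - low + 1).toNat < fuel → 0 ≤ low → high ≤ (l.length : Int) - 1 →
      bsearchALoop l value fuel low high = -1 := by
  intro fuel
  induction fuel with
  | zero => intro low high hd; omega
  | succ fuel ih =>
    intro low high hd h0 hh1
    rw [bsearchALoop]
    split
    · next hlh =>
      dsimp only
      have hm := pvMidA_bounds low high hlh
      set mid := low + PySem.Int.floordiv (high - low) 2 with hmid
      have hmn : mid.toNat < l.length := by omega
      have hget : PySem.List.pyGet? l mid = some (l[mid.toNat]'hmn) :=
        PySem.List.pyGet?_eq_some_getElem l (by omega) (by omega)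
      rw [hget]
      simp only []
      rw [if_neg (by have := hall _ (List.getElem_mem hmn); omega : ¬ (l[mid.toNat]'hmn ≥ value))]
      exact ih (mid + 1) high (by omega) (by omega) hh1
    · next hlh => rfl

-- B's scan on a sorted list returns the count of elements < value (if any element is ≥ value).
theorem pvScan_sorted (value : Int) : ∀ (l : List Int), l.Pairwise (· ≤ ·) → ∀ (i : Int),
    pvScan value l i =
      (if l.countP (fun x => decide (x < value)) < l.length
        then i + (l.countP (fun x => decide (x < value)) : Int) else -1) := by
  intro l
  induction l with
  | nil => intro _ i; simp [pvScan]
  | cons a t ih =>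
    intro hp i
    obtain ⟨ha, ht⟩ := List.pairwise_cons.mp hp
    rw [pvScan]
    by_cases hav : a ≥ value
    · have hz : t.countP (fun x => decide (x < value)) = 0 := by
        apply List.countP_eq_zero.mpr
        intro x hx
        have := ha x hx
        simp only [decide_eq_true_eq]
        omega
      rw [if_pos hav]
      rw [if_pos (by simp [List.countP_cons, hz, show ¬ (a < value) by omega])]
      simp [List.countP_cons, hz, show ¬ (a < value) by omega]
    · rw [if_neg hav]
      rw [ih ht (i + 1)]
      have hc : (a :: t).countP (fun x => decide (x < value)) = t.countP (fun x => decide (x < value)) + 1 := by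
        simp [List.countP_cons, show a < value by omega]
      rw [hc]
      by_cases h : t.countP (fun x => decide (x < value)) < t.length
      · rw [if_pos h, if_pos (by simp only [List.length_cons]; omega)]
        push_cast
        ring
      · rw [if_neg h, if_neg (by simp only [List.length_cons]; omega)]

theorem pvScan_allGe (l : List Int) (value : Int) (hall : ∀ x ∈ l, value ≤ x) (hne : l ≠ []) :
    pvScan value l 0 = 0 := by
  cases l with
  | nil => exact absurd rfl hne
  | cons a t =>
    rw [pvScan, if_pos (by have := hall a (by simp); omega)]

theorem pvScan_allLt (l : List Int) (value : Int) (hall : ∀ x ∈ l, x < value) :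
    ∀ i, pvScan value l i = -1 := by
  induction l with
  | nil => intro i; simp [pvScan]
  | cons a t ih =>
    intro i
    rw [pvScan, if_neg (by have := hall a (by simp); omega)]
    exact ih (fun x hx => hall x (by simp [hx])) (i + 1)

-- ===== VERDICT (by name: the statement is the Claim_ definition above) =====
theorem bsearch_left_not_less_spec : Claim_equal_bsearch_left_not_less := by
  intro l value _ hpre
  unfold Spec_bsearch_left_not_less
  rcases hpre with hs | hge | hlt
  · have hkn : l.countP (fun x => decide (x < value)) ≤ l.length := List.countP_le_length
    have hA := pvALoop_eq l value hs (l.length + 1) 0 ((l.length : Int) - 1)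
        (by omega) (by omega) (by omega) (by omega)
        (by
          by_cases h : l.countP (fun x => decide (x < value)) < l.length
          · exact Or.inl (by omega)
          · exact Or.inr ⟨by omega, rfl⟩)
    have hB := pvScan_sorted value l hs 0
    unfold bsearch_left_not_less bsearch_left_not_less_alt
    rw [hA, hB]
    by_cases h : l.countP (fun x => decide (x < value)) < l.length
    · rw [if_pos h, if_pos h]; ring
    · rw [if_neg h, if_neg h]
  · cases l with
    | nil => rfl
    | cons a t =>
      have hn : 1 ≤ ((a :: t).length : Int) := by simp
      unfold bsearch_left_not_less bsearch_left_not_less_alt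
      rw [pvALoop_allGe (a :: t) value hge ((a :: t).length + 1) (((a :: t).length : Int) - 1)
            (by omega) (by omega) (by omega)]
      rw [pvScan_allGe (a :: t) value hge (by simp)]
  · unfold bsearch_left_not_less bsearch_left_not_less_alt
    rw [pvALoop_allLt l value hlt (l.length + 1) 0 ((l.length : Int) - 1)
          (by omega) (by omega) (by omega)]
    rw [pvScan_allLt l value hlt 0]
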